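-- pv_equiv track=rewrite | github.com/efajiculay/SysBioSoft | process_sbml_old.py | extractVarFunc
-- ===== SOURCE A (Python) =====
-- def extractVarFunc(ss):
-- 	v = ""
-- 	lastComma = 0
-- 	oper = {"+","-","*","/","(",")"}
-- 	p = 0
-- 	for x in ss+")":
-- 		if x == ",":
-- 			lastComma = p
-- 		elif x not in oper:
-- 			pass
-- 		else:
-- 			return [ss[0:lastComma],ss[lastComma+1:]]
-- 		p = p + 1
-- 	return ["",""]
-- ===== SOURCE B (Python) =====
-- def extractVarFunc(ss):
--     # Two-phase: forward scan for the first operator, then a backward search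
--     # (rfind) for the last comma in the prefix before it.
--     opers = set("+-*/()")
--     first_op = next((i for i, x in enumerate(ss) if x in opers), len(ss))
--     j = ss[:first_op].rfind(',')
--     last_comma = j if j != -1 else 0
--     return [ss[:last_comma], ss[last_comma + 1:]]
-- ===== Notes on version B (the rewrite author's own statement) =====
-- stated objective: alternative
-- what changed: Replaces A's single stateful pass over the sentinel-extended string (tracking lastComma and a position counter with an early return) by two independent phases: a forward scan for the index of the first operator, then a backward rfind for the last comma within that prefix.
import Mathlib
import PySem

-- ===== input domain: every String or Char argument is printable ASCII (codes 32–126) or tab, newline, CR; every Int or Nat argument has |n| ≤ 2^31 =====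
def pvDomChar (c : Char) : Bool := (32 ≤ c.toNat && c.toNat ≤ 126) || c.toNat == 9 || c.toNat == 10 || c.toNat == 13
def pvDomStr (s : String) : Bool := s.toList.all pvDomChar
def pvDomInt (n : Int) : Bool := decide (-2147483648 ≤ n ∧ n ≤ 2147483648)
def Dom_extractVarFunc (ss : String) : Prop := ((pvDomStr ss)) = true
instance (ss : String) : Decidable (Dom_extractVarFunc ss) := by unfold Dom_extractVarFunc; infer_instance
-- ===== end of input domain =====

-- B replaces A's single state-tracking pass with two phases: a forward scan for the
-- first operator, then a backward search (rfind) for the last comma before it (alternative decomposition).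


-- ===== PORT A =====
def pvIsOper (c : Char) : Bool :=
  c == '+' || c == '-' || c == '*' || c == '/' || c == '(' || c == ')'

-- the 'for x in ss+")"' loop with state (lastComma, p); early return on an operator
def pvALoop (ss : String) (cs : List Char) (lastComma p : Nat) : List String :=
  match cs with
  | [] => ["", ""]
  | x :: rest =>
    if x = ',' then pvALoop ss rest p (p + 1)
    else if pvIsOper x then
      [PySem.Str.slice ss (some 0) (some (lastComma : Int)),
       PySem.Str.slice ss (some ((lastComma : Int) + 1)) none]
    else pvALoop ss rest lastComma (p + 1)

def extractVarFunc (ss : String) : List String :=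
  pvALoop ss (ss.toList ++ [')']) 0 0

-- ===== PORT B =====
-- next((i for i, x in enumerate(ss) if x in opers), len(ss)) : forward scan with counter i, default n
def pvFirstOp (cs : List Char) (i n : Nat) : Nat :=
  match cs with
  | [] => n
  | c :: r => if pvIsOper c then i else pvFirstOp r (i + 1) n

-- hand port of str.rfind(',') (single-character needle): index of the LAST ',' or -1; exact
def pvRfindComma (cs : List Char) : Int :=
  match cs with
  | [] => -1
  | c :: r =>
    let t := pvRfindComma r
    if t ≠ -1 then t + 1 else if c = ',' then 0 else -1

def extractVarFunc_alt (ss : String) : List String :=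
  let cs := ss.toList
  let firstOp := pvFirstOp cs 0 cs.length
  let j := pvRfindComma (PySem.Str.slice ss none (some (firstOp : Int))).toList
  let lastComma : Int := if j ≠ -1 then j else 0
  [PySem.Str.slice ss none (some lastComma),
   PySem.Str.slice ss (some (lastComma + 1)) none]

-- ===== PRECONDITION & SPEC =====
def Spec_extractVarFunc (ss : String) (out : List String) : Prop := out = extractVarFunc_alt ss
instance (ss : String) (out : List String) : Decidable (Spec_extractVarFunc ss out) := by unfold Spec_extractVarFunc; infer_instance

-- ===== CLAIM (what is proved, stated in full; the proofs are below) =====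
def Claim_equal_extractVarFunc : Prop := ∀ (ss : String), Dom_extractVarFunc ss → Spec_extractVarFunc ss (extractVarFunc ss)

-- ===== LEMMAS AND PROOFS =====

-- the lastComma value A's loop holds when it first meets an operator
def lcAux (cs : List Char) (lc p : Nat) : Nat :=
  match cs with
  | [] => lc
  | c :: r =>
    if c = ',' then lcAux r p (p + 1)
    else if pvIsOper c then lc
    else lcAux r lc (p + 1)

lemma pvRfindComma_cases (cs : List Char) :
    pvRfindComma cs = -1 ∨ 0 ≤ pvRfindComma cs := by
  induction cs with
  | nil => left; rfl
  | cons c r ih =>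
    simp only [pvRfindComma]
    rcases ih with h | h
    · by_cases hc : c = ',' <;> simp [h, hc]
    · have hne : pvRfindComma r ≠ -1 := by omega
      right
      simp [hne]
      omega

-- A's loop, once an operator is certain to occur, returns the slices at lcAux
lemma pvALoop_spec (cs : List Char) (ss : String) :
    ∀ lc p, (∃ c ∈ cs, pvIsOper c) →
    pvALoop ss cs lc p =
      [PySem.Str.slice ss (some 0) (some ((lcAux cs lc p : Nat) : Int)),
       PySem.Str.slice ss (some ((lcAux cs lc p : Nat) + 1)) none] := by
  induction cs with
  | nil => intro lc p h; simp at h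
  | cons c r ih =>
    intro lc p h
    by_cases hc : c = ','
    · have hop : ¬ pvIsOper c := by subst hc; decide
      have hr : ∃ x ∈ r, pvIsOper x := by
        rcases h with ⟨x, hx, hxo⟩
        rcases List.mem_cons.mp hx with rfl | hx
        · exact absurd hxo hop
        · exact ⟨x, hx, hxo⟩
      simp [pvALoop, lcAux, hc, ih _ _ hr]
    · by_cases hop : pvIsOper c
      · simp [pvALoop, lcAux, hc, hop]
      · have hr : ∃ x ∈ r, pvIsOper x := by
          rcases h with ⟨x, hx, hxo⟩
          rcases List.mem_cons.mp hx with rfl | hx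
          · exact absurd hxo hop
          · exact ⟨x, hx, hxo⟩
        simp [pvALoop, lcAux, hc, hop, ih _ _ hr]

-- appending an operator does not change the operator-free prefix
lemma takeWhile_append_op (cs : List Char) :
    (cs ++ [')']).takeWhile (fun c => !pvIsOper c) = cs.takeWhile (fun c => !pvIsOper c) := by
  induction cs with
  | nil => decide
  | cons c r ih =>
    by_cases h : pvIsOper c <;> simp [List.takeWhile, h, ih]

-- B's forward scan finds the length of the operator-free prefix
lemma pvFirstOp_spec (cs : List Char) :
    ∀ i, pvFirstOp cs i (i + cs.length) = i + (cs.takeWhile (fun c => !pvIsOper c)).length := by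
  induction cs with
  | nil => intro i; simp [pvFirstOp]
  | cons c r ih =>
    intro i
    by_cases h : pvIsOper c
    · simp [pvFirstOp, h, List.takeWhile]
    · simp only [pvFirstOp, h, Bool.false_eq_true, if_false, List.length_cons]
      rw [show i + (r.length + 1) = (i + 1) + r.length by omega, ih (i + 1)]
      simp [List.takeWhile, h]
      omega

lemma take_length_takeWhile (cs : List Char) (p : Char → Bool) :
    cs.take (cs.takeWhile p).length = cs.takeWhile p := by
  induction cs with
  | nil => simp
  | cons c r ih =>
    by_cases h : p c <;> simp [List.takeWhile, h, ih]

-- lcAux started at (lc, p) is the rfind of the operator-free prefix, offset by p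
lemma lcAux_eq_rfind (cs : List Char) :
    ∀ lc p, lcAux cs lc p =
      if pvRfindComma (cs.takeWhile (fun c => !pvIsOper c)) = -1 then lc
      else p + (pvRfindComma (cs.takeWhile (fun c => !pvIsOper c))).toNat := by
  induction cs with
  | nil => intro lc p; simp [lcAux, pvRfindComma]
  | cons c r ih =>
    intro lc p
    by_cases hc : c = ','
    · have hpred : (!pvIsOper c) = true := by subst hc; decide
      have htw : List.takeWhile (fun c => !pvIsOper c) (c :: r)
          = c :: List.takeWhile (fun c => !pvIsOper c) r := by
        simp [hpred]
      rw [show lcAux (c :: r) lc p = lcAux r p (p + 1) from by simp [lcAux, hc],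
          htw, ih p (p + 1)]
      simp only [pvRfindComma]
      rcases pvRfindComma_cases (r.takeWhile (fun c => !pvIsOper c)) with h | h
      · rw [h]; subst hc; simp
      · have hne : pvRfindComma (r.takeWhile (fun c => !pvIsOper c)) ≠ -1 := by omega
        simp only [hne, ite_not, if_false]
        have h1 : ¬ (pvRfindComma (r.takeWhile (fun c => !pvIsOper c)) + 1 = -1) := by omega
        simp only [h1, if_false]
        omega
    · by_cases hop : pvIsOper c
      · have hpred : (!pvIsOper c) = false := by simp [hop]
        have htw : List.takeWhile (fun c => !pvIsOper c) (c :: r) = [] := by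
          simp [hpred]
        rw [htw]
        simp [lcAux, hc, hop, pvRfindComma]
      · have hpred : (!pvIsOper c) = true := by simp [hop]
        have htw : List.takeWhile (fun c => !pvIsOper c) (c :: r)
            = c :: List.takeWhile (fun c => !pvIsOper c) r := by
          simp [hpred]
        rw [show lcAux (c :: r) lc p = lcAux r lc (p + 1) from by simp [lcAux, hc, hop],
            htw, ih lc (p + 1)]
        simp only [pvRfindComma]
        rcases pvRfindComma_cases (r.takeWhile (fun c => !pvIsOper c)) with h | h
        · rw [h]; simp [hc]
        · have hne : pvRfindComma (r.takeWhile (fun c => !pvIsOper c)) ≠ -1 := by omega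
          have h1 : ¬ (pvRfindComma (r.takeWhile (fun c => !pvIsOper c)) + 1 = -1) := by omega
          simp only [hne, h1, if_false, ite_not]
          omega

-- ss[0:k] = ss[:k] at the string level
lemma str_slice_zero (ss : String) (b : Option Int) :
    PySem.Str.slice ss (some 0) b = PySem.Str.slice ss none b := by
  simp [PySem.Str.slice]

-- ===== VERDICT (by name: the statement is the Claim_ definition above) =====
theorem extractVarFunc_spec : Claim_equal_extractVarFunc := by
  intro ss _
  unfold Spec_extractVarFunc
  have hop : ∃ c ∈ ss.toList ++ [')'], pvIsOper c := ⟨')', by simp, by decide⟩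
  rw [extractVarFunc, pvALoop_spec _ ss 0 0 hop]
  dsimp only [extractVarFunc_alt]
  have hfo : pvFirstOp ss.toList 0 ss.toList.length
      = (ss.toList.takeWhile (fun c => !pvIsOper c)).length := by
    simpa using pvFirstOp_spec ss.toList 0
  have hpre : (PySem.Str.slice ss none (some ((pvFirstOp ss.toList 0 ss.toList.length : Nat) : Int))).toList
      = ss.toList.takeWhile (fun c => !pvIsOper c) := by
    rw [hfo]
    simp [PySem.Str.slice, PySem.List.slice_to_natCast]
    exact take_length_takeWhile ss.toList _
  rw [hpre]
  have hlc : lcAux (ss.toList ++ [')']) 0 0 =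
      if pvRfindComma (ss.toList.takeWhile (fun c => !pvIsOper c)) = -1 then 0
      else (pvRfindComma (ss.toList.takeWhile (fun c => !pvIsOper c))).toNat := by
    rw [lcAux_eq_rfind (ss.toList ++ [')']) 0 0, takeWhile_append_op]
    split_ifs <;> omega
  rw [hlc]
  rcases pvRfindComma_cases (ss.toList.takeWhile (fun c => !pvIsOper c)) with h | h
  · rw [h]
    norm_num [str_slice_zero]
  · have hne : pvRfindComma (ss.toList.takeWhile (fun c => !pvIsOper c)) ≠ -1 := by omega
    simp only [hne, if_false, ite_not]
    rw [str_slice_zero]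
    have hcast : (((pvRfindComma (ss.toList.takeWhile (fun c => !pvIsOper c))).toNat : Nat) : Int)
        = pvRfindComma (ss.toList.takeWhile (fun c => !pvIsOper c)) := Int.toNat_of_nonneg h
    rw [hcast]
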